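-- pv_equiv track=rewrite | github.com/ishtiaqbhatti/lark_app | backend/pipeline/step_04_analysis/content_analysis_modules/heading_analyzer.py | extract_common_headings
-- ===== SOURCE A (Python) =====
-- from typing import List, Dict, Any
-- from collections import Counter
--
-- def extract_common_headings(
--     competitor_analysis: List[Dict[str, Any]], num_headings: int
-- ) -> List[str]:
--     """Extracts the most common H2 and H3 headings from competitor data."""
--     all_headings = Counter(
--         h
--         for c in competitor_analysis
--         if c.get("headings")
--         for h_type in ["h2", "h3"]
--         for h in c["headings"].get(h_type, [])
--     )
--     return [h for h, count in all_headings.most_common(num_headings)]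
-- ===== SOURCE B (Python) =====
-- def extract_common_headings(competitor_analysis, num_headings):
--     """Count headings in a plain dict, then emit them bucket-by-bucket in
--     descending count order (insertion order within a bucket) instead of
--     Counter.most_common's heap-based top-k selection."""
--     if num_headings <= 0:
--         return []
--     counts = {}
--     for c in competitor_analysis:
--         headings = c.get("headings")
--         if headings:
--             for h_type in ("h2", "h3"):
--                 for h in headings.get(h_type, []):
--                     counts[h] = counts.get(h, 0) + 1
--     buckets = {}
--     for h, cnt in counts.items():
--         buckets.setdefault(cnt, []).append(h)
--     result = []
--     for cnt in sorted(buckets, reverse=True):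
--         result.extend(buckets[cnt])
--     return result[:num_headings]
-- ===== Notes on version B (the rewrite author's own statement) =====
-- stated objective: alternative
-- what changed: Replaces Counter + most_common's heap-based top-k with a plain counting dict followed by grouping headings into count-buckets and emitting buckets in descending count order, slicing the first num_headings.
import Mathlib
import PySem

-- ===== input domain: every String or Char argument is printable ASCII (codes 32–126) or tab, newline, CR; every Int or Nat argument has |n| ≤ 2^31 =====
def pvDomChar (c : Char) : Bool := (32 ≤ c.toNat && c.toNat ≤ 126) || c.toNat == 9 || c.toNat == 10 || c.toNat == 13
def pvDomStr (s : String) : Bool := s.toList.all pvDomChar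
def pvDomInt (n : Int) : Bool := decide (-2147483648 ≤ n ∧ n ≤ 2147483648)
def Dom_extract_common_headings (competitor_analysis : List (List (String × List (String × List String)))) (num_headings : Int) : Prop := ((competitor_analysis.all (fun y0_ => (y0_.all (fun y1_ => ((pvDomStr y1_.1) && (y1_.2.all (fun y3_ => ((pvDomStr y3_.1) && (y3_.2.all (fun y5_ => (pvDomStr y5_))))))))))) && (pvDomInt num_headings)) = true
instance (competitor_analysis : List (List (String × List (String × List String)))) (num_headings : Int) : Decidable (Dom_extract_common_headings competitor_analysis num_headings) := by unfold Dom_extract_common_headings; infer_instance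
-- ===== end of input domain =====

-- B replaces Counter + most_common's top-k selection by a counting dict whose headings are
-- grouped into count-buckets and emitted in descending count order (objective: alternative).

-- dict.get on an association list: first match (shared by both ports)
def pvGet {α : Type} (d : List (String × α)) (k : String) : Option α :=
  (d.find? (fun p => p.1 == k)).map (·.2)

-- ===== PORT A =====
-- Counter(generator) over the nested comprehension, then most_common(n)
-- (= the headings of the items sorted by count descending, stable, first max(0,n) of them).
def extract_common_headings (competitor_analysis : List (List (String × List (String × List String)))) (num_headings : Int) : List String :=
  let gen := competitor_analysis.foldl (fun acc c =>
    match pvGet c "headings" with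
    | none => acc
    | some hd =>
      if hd = [] then acc
      else ["h2", "h3"].foldl (fun acc2 ht =>
        acc2 ++ ((pvGet hd ht).getD [])) acc) []
  let all_headings := PySem.Dict.counter gen
  let mc := (PySem.List.sorted all_headings.items (fun p => p.2) true).map (·.1)
  if num_headings ≤ 0 then [] else mc.take num_headings.toNat

-- ===== PORT B =====
def extract_common_headings_alt (competitor_analysis : List (List (String × List (String × List String)))) (num_headings : Int) : List String :=
  if num_headings ≤ 0 then [] else
  let counts := competitor_analysis.foldl (fun d c =>
    match pvGet c "headings" with
    | none => d
    | some hd =>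
      if hd = [] then d
      else ["h2", "h3"].foldl (fun d2 ht =>
        ((pvGet hd ht).getD []).foldl (fun d3 h => d3.modify h (0 : Int) (· + 1)) d2) d)
    PySem.Dict.empty
  let buckets := counts.items.foldl
    (fun b p => b.modify p.2 ([] : List String) (· ++ [p.1])) PySem.Dict.empty
  let result := (PySem.List.sorted buckets.keys (fun x => x) true).foldl
    (fun r cnt => r ++ buckets.getD cnt []) []
  PySem.List.slice result none (some num_headings)

-- ===== PRECONDITION & SPEC =====
def Spec_extract_common_headings (competitor_analysis : List (List (String × List (String × List String)))) (num_headings : Int) (out : List String) : Prop := out = extract_common_headings_alt competitor_analysis num_headings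
instance (competitor_analysis : List (List (String × List (String × List String)))) (num_headings : Int) (out : List String) : Decidable (Spec_extract_common_headings competitor_analysis num_headings out) := by unfold Spec_extract_common_headings; infer_instance

-- ===== CLAIM (what is proved, stated in full; the proofs are below) =====
def Claim_equal_extract_common_headings : Prop := ∀ (competitor_analysis : List (List (String × List (String × List String)))) (num_headings : Int), Dom_extract_common_headings competitor_analysis num_headings → Spec_extract_common_headings competitor_analysis num_headings (extract_common_headings competitor_analysis num_headings)

-- ===== LEMMAS AND PROOFS =====

-- the flattened generator, per competitor
def pvHOf (c : List (String × List (String × List String))) : List String :=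
  match pvGet c "headings" with
  | none => []
  | some hd => if hd = [] then [] else ["h2", "h3"].flatMap (fun ht => (pvGet hd ht).getD [])

-- the distinct counts, descending
def pvS (l : List Int) : List Int := PySem.List.sorted (PySem.Set.ofList l) (fun x => x) true

-- bucket-concatenation canonical form of the stable descending sort
def pvG (q : List (String × Int)) : List (String × Int) :=
  (pvS (q.map (·.2))).flatMap (fun d => q.filter (fun p => p.2 == d))

-- insert a count into a strictly descending list of counts
def pvDsIns (c : Int) : List Int → List Int
  | [] => [c]
  | d :: t => if c < d then d :: pvDsIns c t else if c = d then d :: t else c :: d :: t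

lemma pv_mem_dsIns (c y : Int) (ds : List Int) : y ∈ pvDsIns c ds ↔ y = c ∨ y ∈ ds := by
  induction ds with
  | nil => simp [pvDsIns]
  | cons d t ih =>
    by_cases h1 : c < d
    · simp only [pvDsIns, if_pos h1, List.mem_cons, ih]; tauto
    · by_cases h2 : c = d
      · subst h2; simp [pvDsIns]
      · simp [pvDsIns, h1, h2]

lemma pv_pairwise_dsIns (c : Int) (ds : List Int) (h : ds.Pairwise (fun a b => b < a)) :
    (pvDsIns c ds).Pairwise (fun a b => b < a) := by
  induction ds with
  | nil => simp [pvDsIns]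
  | cons d t ih =>
    rcases List.pairwise_cons.1 h with ⟨hd, ht⟩
    by_cases h1 : c < d
    · simp only [pvDsIns, if_pos h1]
      refine List.pairwise_cons.2 ⟨?_, ih ht⟩
      intro y hy
      rcases (pv_mem_dsIns c y t).1 hy with rfl | hy'
      · exact h1
      · exact hd y hy'
    · by_cases h2 : c = d
      · subst h2
        simp only [pvDsIns, if_neg h1, if_pos trivial]
        exact h
      · have hdc : d < c := by omega
        simp only [pvDsIns, if_neg h1, if_neg h2]
        refine List.pairwise_cons.2 ⟨?_, h⟩
        intro y hy
        rcases List.mem_cons.1 hy with rfl | hy'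
        · exact hdc
        · exact lt_trans (hd y hy') hdc

lemma pv_ins_skip {α : Type} (bef : α → α → Bool) (x : α) (as bs : List α)
    (h : ∀ a ∈ as, bef x a = false) :
    PySem.List.insertBy bef x (as ++ bs) = as ++ PySem.List.insertBy bef x bs := by
  induction as with
  | nil => rfl
  | cons a t ih =>
    have ha : bef x a = false := h a (by simp)
    simp only [List.cons_append, PySem.List.insertBy, ha]
    simp only [Bool.false_eq_true, if_false]
    rw [ih (fun a ha => h a (by simp [ha]))]

lemma pv_ins_front {α : Type} (bef : α → α → Bool) (x : α) (bs : List α)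
    (h : ∀ b ∈ bs, bef x b = true) :
    PySem.List.insertBy bef x bs = x :: bs := by
  cases bs with
  | nil => rfl
  | cons b t => simp [PySem.List.insertBy, h b (by simp)]

lemma pv_filter_snoc (q : List (String × Int)) (x : String × Int) (d : Int) :
    (q ++ [x]).filter (fun p => p.2 == d)
      = q.filter (fun p => p.2 == d) ++ (if x.2 = d then [x] else []) := by
  rw [List.filter_append]
  by_cases h : x.2 = d
  · simp [List.filter, h]
  · have : (x.2 == d) = false := by simpa using h
    simp [List.filter, this, h]

-- core: inserting one item into the bucket-grouped list regroups it
lemma pv_step (x : String × Int) (ds : List Int) (q : List (String × Int))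
    (hds : ds.Pairwise (fun a b => b < a))
    (hqc : x.2 ∉ ds → ∀ y ∈ q, y.2 ≠ x.2) :
    PySem.List.insertBy (fun a b => decide (b.2 < a.2)) x
        (ds.flatMap (fun d => q.filter (fun p => p.2 == d)))
      = (pvDsIns x.2 ds).flatMap (fun d => (q ++ [x]).filter (fun p => p.2 == d)) := by
  induction ds with
  | nil =>
    have hq : ∀ y ∈ q, y.2 ≠ x.2 := hqc (by simp)
    have hfq : q.filter (fun p => p.2 == x.2) = [] :=
      List.filter_eq_nil_iff.2 (fun y hy => by simpa using hq y hy)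
    simp [pvDsIns, hfq, PySem.List.insertBy]
  | cons d t ih =>
    rcases List.pairwise_cons.1 hds with ⟨hd, ht⟩
    rcases lt_trichotomy x.2 d with h1 | h1 | h1
    · -- x.2 < d : skip the d-bucket and recurse
      have hskip : ∀ y ∈ q.filter (fun p => p.2 == d), decide (y.2 < x.2) = false := by
        intro y hy
        have hy2 : y.2 = d := by simpa using List.of_mem_filter hy
        simp [hy2]; omega
      have hqc' : x.2 ∉ t → ∀ y ∈ q, y.2 ≠ x.2 := by
        intro hn
        exact hqc (by simp; exact ⟨by omega, hn⟩)
      rw [List.flatMap_cons, pv_ins_skip _ _ _ _ hskip, ih ht hqc']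
      have hds' : pvDsIns x.2 (d :: t) = d :: pvDsIns x.2 t := by
        simp [pvDsIns, h1]
      rw [hds', List.flatMap_cons, pv_filter_snoc]
      simp [show ¬ x.2 = d by omega]
    · -- x.2 = d : skip the d-bucket, insert at the front of the rest
      have hskip : ∀ y ∈ q.filter (fun p => p.2 == d), decide (y.2 < x.2) = false := by
        intro y hy
        have hy2 : y.2 = d := by simpa using List.of_mem_filter hy
        simp [hy2]; omega
      have hfront : ∀ y ∈ t.flatMap (fun d' => q.filter (fun p => p.2 == d')),
          decide (y.2 < x.2) = true := by
        intro y hy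
        rcases List.mem_flatMap.1 hy with ⟨d', hd', hyf⟩
        have hy2 : y.2 = d' := by simpa using List.of_mem_filter hyf
        have : d' < d := hd d' hd'
        simp [hy2]; omega
      rw [List.flatMap_cons, pv_ins_skip _ _ _ _ hskip, pv_ins_front _ _ _ hfront]
      have hds' : pvDsIns x.2 (d :: t) = d :: t := by
        simp [pvDsIns, h1]
      rw [hds', List.flatMap_cons, pv_filter_snoc]
      have htail : List.flatMap (fun d' => List.filter (fun p => p.2 == d') (q ++ [x])) t
          = List.flatMap (fun d' => List.filter (fun p => p.2 == d') q) t :=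
        List.flatMap_congr (fun d' hd' => by
          rw [pv_filter_snoc]
          simp [show ¬ x.2 = d' by have := hd d' hd'; omega])
      rw [htail]
      simp [h1]
    · -- d < x.2 : insert at the very front, creating a fresh bucket
      have hnotin : x.2 ∉ (d :: t) := by
        intro hmem
        rcases List.mem_cons.1 hmem with h | h
        · omega
        · have := hd _ h; omega
      have hq : ∀ y ∈ q, y.2 ≠ x.2 := hqc hnotin
      have hfq : q.filter (fun p => p.2 == x.2) = [] :=
        List.filter_eq_nil_iff.2 (fun y hy => by simpa using hq y hy)
      have hfront : ∀ y ∈ (d :: t).flatMap (fun d' => q.filter (fun p => p.2 == d')),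
          decide (y.2 < x.2) = true := by
        intro y hy
        rcases List.mem_flatMap.1 hy with ⟨d', hd', hyf⟩
        have hy2 : y.2 = d' := by simpa using List.of_mem_filter hyf
        have : d' ≤ d := by
          rcases List.mem_cons.1 hd' with h | h
          · omega
          · have := hd _ h; omega
        simp [hy2]; omega
      rw [pv_ins_front _ _ _ hfront]
      have hds' : pvDsIns x.2 (d :: t) = x.2 :: d :: t := by
        simp [pvDsIns, show ¬ x.2 < d by omega, show ¬ x.2 = d by omega]
      rw [hds']
      conv_rhs => rw [List.flatMap_cons]
      rw [pv_filter_snoc]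
      have htail : List.flatMap (fun d' => List.filter (fun p => p.2 == d') (q ++ [x])) (d :: t)
          = List.flatMap (fun d' => List.filter (fun p => p.2 == d') q) (d :: t) :=
        List.flatMap_congr (fun d' hd' => by
          rw [pv_filter_snoc]
          have : d' ≤ d := by
            rcases List.mem_cons.1 hd' with h | h
            · omega
            · have := hd _ h; omega
          simp [show ¬ x.2 = d' by omega])
      rw [htail]
      simp [hfq]

lemma pv_sorted_rev_strict (l : List Int) (h : l.Nodup) :
    (PySem.List.sorted l (fun x => x) true).Pairwise (fun a b => b < a) := by
  have hpw := PySem.List.sorted_pairwise_rev l (fun x => x)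
  have hnd : (PySem.List.sorted l (fun x => x) true).Nodup :=
    (PySem.List.sorted_perm l (fun x => x) true).symm.nodup h
  exact (hpw.and hnd).imp (fun hab => lt_of_le_of_ne hab.1 (fun he => hab.2 he.symm))

lemma pv_mem_S (l : List Int) (y : Int) : y ∈ pvS l ↔ y ∈ l := by
  rw [pvS, PySem.List.mem_sorted, PySem.Set.mem_ofList]

lemma pv_S_pairwise (l : List Int) : (pvS l).Pairwise (fun a b => b < a) :=
  pv_sorted_rev_strict _ (PySem.Set.nodup_ofList l)

lemma pv_nodup_dsIns (c : Int) (l : List Int) (h : l.Pairwise (fun a b => b < a)) :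
    (pvDsIns c l).Nodup :=
  (pv_pairwise_dsIns c l h).imp (fun hab => ne_of_gt hab)

lemma pv_S_snoc (l : List Int) (c : Int) : pvS (l ++ [c]) = pvDsIns c (pvS l) := by
  unfold pvS
  apply PySem.List.sorted_rev_eq_of_perm_of_pairwise_gt
  · apply (List.perm_ext_iff_of_nodup (pv_nodup_dsIns c _ (pv_S_pairwise l)) (PySem.Set.nodup_ofList _)).2
    intro a
    rw [pv_mem_dsIns, PySem.Set.mem_ofList, List.mem_append, List.mem_singleton]
    rw [pv_mem_S l a]
    tauto
  · exact pv_pairwise_dsIns c _ (pv_S_pairwise l)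

lemma pv_G_snoc (q : List (String × Int)) (x : String × Int) :
    PySem.List.insertBy (fun a b => decide (b.2 < a.2)) x (pvG q) = pvG (q ++ [x]) := by
  unfold pvG
  rw [List.map_append, List.map_singleton, pv_S_snoc]
  exact pv_step x _ q (pv_S_pairwise _) (fun hnm y hy he => by
    exact hnm ((pv_mem_S _ _).2 (List.mem_map.2 ⟨y, hy, he⟩)))

lemma pv_sorted_eq_G (q : List (String × Int)) :
    PySem.List.sorted q (fun p => p.2) true = pvG q := by
  have main : ∀ (s q : List (String × Int)),
      s.foldl (fun acc x => PySem.List.insertBy (fun a b => decide (b.2 < a.2)) x acc) (pvG q)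
        = pvG (q ++ s) := by
    intro s
    induction s with
    | nil => intro q; simp
    | cons x t ih =>
      intro q
      simp only [List.foldl_cons]
      rw [pv_G_snoc, ih]
      congr 1
      simp
  have h0 : pvG ([] : List (String × Int)) = [] := by
    unfold pvG pvS
    simp [PySem.Set.ofList]
  rw [PySem.List.sorted_rev_eq_foldl_insertBy]
  have := main q []
  rw [h0] at this
  simpa using this

-- two nodup lists with the same members have the same descending sort
lemma pv_sorted_rev_id_congr (l1 l2 : List Int) (h1 : l1.Nodup) (h2 : l2.Nodup)
    (hm : ∀ x, x ∈ l1 ↔ x ∈ l2) :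
    PySem.List.sorted l1 (fun x => x) true = PySem.List.sorted l2 (fun x => x) true := by
  apply PySem.List.sorted_rev_eq_of_perm_of_pairwise_gt
  · exact (PySem.List.sorted_perm l2 (fun x => x) true).trans
      ((List.perm_ext_iff_of_nodup h2 h1).2 (fun a => (hm a).symm))
  · exact pv_sorted_rev_strict l2 h2

-- flattening the two ports' nested loops
lemma pv_gen_eq (ca : List (List (String × List (String × List String)))) (acc : List String) :
    ca.foldl (fun acc c =>
      match pvGet c "headings" with
      | none => acc
      | some hd =>
        if hd = [] then acc
        else ["h2", "h3"].foldl (fun acc2 ht => acc2 ++ ((pvGet hd ht).getD [])) acc) acc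
      = acc ++ ca.flatMap pvHOf := by
  induction ca generalizing acc with
  | nil => simp
  | cons c t ih =>
    rw [List.foldl_cons, List.flatMap_cons]
    have hstep : (match pvGet c "headings" with
        | none => acc
        | some hd =>
          if hd = [] then acc
          else ["h2", "h3"].foldl (fun acc2 ht => acc2 ++ ((pvGet hd ht).getD [])) acc)
        = acc ++ pvHOf c := by
      unfold pvHOf
      cases pvGet c "headings" with
      | none => simp
      | some hd =>
        by_cases hhd : hd = [] <;> simp [hhd, List.foldl, List.flatMap, List.append_assoc]
    rw [hstep, ih, List.append_assoc]

lemma pv_counts_eq (ca : List (List (String × List (String × List String))))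
    (d : PySem.Dict String Int) :
    ca.foldl (fun d c =>
      match pvGet c "headings" with
      | none => d
      | some hd =>
        if hd = [] then d
        else ["h2", "h3"].foldl (fun d2 ht =>
          ((pvGet hd ht).getD []).foldl (fun d3 h => d3.modify h 0 (· + 1)) d2) d) d
      = (ca.flatMap pvHOf).foldl (fun d3 h => d3.modify h 0 (· + 1)) d := by
  induction ca generalizing d with
  | nil => simp
  | cons c t ih =>
    rw [List.foldl_cons, List.flatMap_cons, List.foldl_append, ih]
    congr 1
    unfold pvHOf
    cases pvGet c "headings" with
    | none => simp
    | some hd =>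
      by_cases hhd : hd = [] <;>
        simp [hhd, List.foldl, List.flatMap, List.foldl_append]

-- the bucket dictionary's lookups and keys
lemma pv_buckets_getD (its : List (String × Int)) (b0 : PySem.Dict Int (List String)) (c : Int) :
    (its.foldl (fun b p => b.modify p.2 ([] : List String) (· ++ [p.1])) b0).getD c []
      = b0.getD c [] ++ (its.filter (fun p => p.2 == c)).map (·.1) := by
  induction its generalizing b0 with
  | nil => simp
  | cons p t ih =>
    simp only [List.foldl_cons]
    rw [ih]
    rw [PySem.Dict.getD_modify]
    by_cases h : c = p.2
    · have : (p.2 == c) = true := by simp [h]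
      simp [h, List.filter, List.append_assoc]
    · have : (p.2 == c) = false := by simp; omega
      simp [h, this, List.filter]

lemma pv_buckets_keys_mem (its : List (String × Int)) (b0 : PySem.Dict Int (List String)) (k : Int) :
    k ∈ (its.foldl (fun b p => b.modify p.2 ([] : List String) (· ++ [p.1])) b0).keys
      ↔ k ∈ b0.keys ∨ k ∈ its.map (·.2) := by
  induction its generalizing b0 with
  | nil => simp
  | cons p t ih =>
    simp only [List.foldl_cons]
    rw [ih, PySem.Dict.keys_modify]
    simp only [PySem.Dict.mem_keys_insert, List.map_cons, List.mem_cons]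
    tauto

lemma pv_buckets_keys_nodup (its : List (String × Int)) (b0 : PySem.Dict Int (List String))
    (h : b0.keys.Nodup) :
    (its.foldl (fun b p => b.modify p.2 ([] : List String) (· ++ [p.1])) b0).keys.Nodup := by
  induction its generalizing b0 with
  | nil => simpa
  | cons p t ih =>
    simp only [List.foldl_cons]
    apply ih
    rw [PySem.Dict.keys_modify]
    exact PySem.Dict.nodup_keys_insert _ _ _ h

-- named forms of the two ports' per-competitor steps (definitionally equal to the inline lambdas)
def pvAstep (acc : List String) (c : List (String × List (String × List String))) : List String :=
  match pvGet c "headings" with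
  | none => acc
  | some hd =>
    if hd = [] then acc
    else ["h2", "h3"].foldl (fun acc2 ht => acc2 ++ ((pvGet hd ht).getD [])) acc

def pvBstep (d : PySem.Dict String Int) (c : List (String × List (String × List String))) :
    PySem.Dict String Int :=
  match pvGet c "headings" with
  | none => d
  | some hd =>
    if hd = [] then d
    else ["h2", "h3"].foldl (fun d2 ht =>
      ((pvGet hd ht).getD []).foldl (fun d3 h => d3.modify h 0 (· + 1)) d2) d

lemma pvA_eq (ca : List (List (String × List (String × List String)))) (n : Int) :
    extract_common_headings ca n
      = (if n ≤ 0 then [] else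
          ((PySem.List.sorted (PySem.Dict.counter (ca.foldl pvAstep [])).items
            (fun p => p.2) true).map (·.1)).take n.toNat) := rfl

lemma pvB_eq (ca : List (List (String × List (String × List String)))) (n : Int) :
    extract_common_headings_alt ca n
      = (if n ≤ 0 then [] else
          PySem.List.slice
            (((PySem.List.sorted
                ((ca.foldl pvBstep PySem.Dict.empty).items.foldl
                  (fun b p => b.modify p.2 ([] : List String) (· ++ [p.1]))
                  PySem.Dict.empty).keys (fun x => x) true).foldl
              (fun r cnt => r ++ ((ca.foldl pvBstep PySem.Dict.empty).items.foldl
                  (fun b p => b.modify p.2 ([] : List String) (· ++ [p.1]))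
                  PySem.Dict.empty).getD cnt []) []))
            none (some n)) := rfl

lemma pv_gen_eq' (ca : List (List (String × List (String × List String)))) (acc : List String) :
    ca.foldl pvAstep acc = acc ++ ca.flatMap pvHOf := pv_gen_eq ca acc

lemma pv_counts_eq' (ca : List (List (String × List (String × List String))))
    (d : PySem.Dict String Int) :
    ca.foldl pvBstep d = (ca.flatMap pvHOf).foldl (fun d3 h => d3.modify h 0 (· + 1)) d :=
  pv_counts_eq ca d

-- ===== VERDICT (by name: the statement is the Claim_ definition above) =====
theorem extract_common_headings_spec : Claim_equal_extract_common_headings := by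
  intro ca n _
  unfold Spec_extract_common_headings
  rw [pvA_eq, pvB_eq]
  by_cases hn : n ≤ 0
  · simp only [if_pos hn]
  · simp only [if_neg hn]
    rw [PySem.List.slice_to _ (by omega : (0:Int) ≤ n)]
    have hgen := pv_gen_eq' ca []
    rw [List.nil_append] at hgen
    have hcounts := pv_counts_eq' ca PySem.Dict.empty
    rw [← PySem.Dict.counter_eq_foldl] at hcounts
    rw [hgen]
    simp only [hcounts]
    set its := (PySem.Dict.counter (ca.flatMap pvHOf)).items with hits
    set buckets := its.foldl (fun b p => b.modify p.2 ([] : List String) (· ++ [p.1]))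
      PySem.Dict.empty with hbk
    have hknodup : buckets.keys.Nodup :=
      pv_buckets_keys_nodup its PySem.Dict.empty PySem.Dict.nodup_keys_empty
    have hkeys : PySem.List.sorted buckets.keys (fun x => x) true = pvS (its.map (·.2)) := by
      unfold pvS
      refine pv_sorted_rev_id_congr _ _ hknodup (PySem.Set.nodup_ofList _) (fun k => ?_)
      rw [hbk, pv_buckets_keys_mem, PySem.Dict.keys_empty, PySem.Set.mem_ofList]
      simp
    rw [PySem.List.foldl_append_eq_flatMap (fun c => buckets.getD c []), List.nil_append, hkeys]
    have hbget : ∀ c ∈ pvS (its.map (·.2)),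
        buckets.getD c [] = (its.filter (fun p => p.2 == c)).map (·.1) := by
      intro c _
      rw [hbk, pv_buckets_getD, PySem.Dict.getD_empty, List.nil_append]
    rw [List.flatMap_congr hbget]
    rw [pv_sorted_eq_G]
    unfold pvG
    rw [List.map_flatMap]
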